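-- pv_equiv track=rewrite | github.com/MicherlaneSilva/ifpi-ads-algoritmos2020 | atividades/strings/criptografia.py | codify3
-- ===== SOURCE A (Python) =====
-- def codify3(texto):
--     resultado = ""
--
--     for i in range(len(texto)):
--         if i >= (len(texto) // 2):
--                 resultado += chr(ord(texto[i]) - 1)
--         else:
--             resultado += texto[i]
--
--     return resultado
-- ===== SOURCE B (Python) =====
-- def codify3(texto):
--     half = len(texto) // 2
--     return texto[:half] + "".join(chr(ord(c) - 1) for c in texto[half:])
-- ===== Notes on version B (the rewrite author's own statement) =====
-- stated objective: simpler
-- what changed: Replaces the per-index loop with its i>=len//2 branch and repeated string concatenation by a two-segment decomposition: an untouched prefix slice plus a join over the shifted suffix (no per-character branching or quadratic += rebuilding).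
import Mathlib
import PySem

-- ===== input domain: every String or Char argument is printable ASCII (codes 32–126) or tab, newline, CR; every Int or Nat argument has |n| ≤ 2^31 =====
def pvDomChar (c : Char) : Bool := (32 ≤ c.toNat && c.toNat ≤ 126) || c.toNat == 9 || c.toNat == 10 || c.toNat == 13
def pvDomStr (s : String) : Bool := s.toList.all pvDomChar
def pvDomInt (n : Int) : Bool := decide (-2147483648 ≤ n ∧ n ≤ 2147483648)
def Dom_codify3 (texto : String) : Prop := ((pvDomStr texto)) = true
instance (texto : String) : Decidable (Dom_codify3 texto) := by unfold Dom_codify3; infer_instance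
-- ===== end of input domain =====

-- B replaces the per-index loop with its i >= len//2 branch by a two-segment
-- decomposition: untouched prefix slice + shifted suffix (objective: simpler).

-- ===== PORT A =====
-- A: loop i over range(len(texto)); if i >= len//2 append chr(ord(c)-1) else append c.
def codify3 (texto : String) : String :=
  let cs := texto.toList
  let n : Int := PySem.Str.len texto
  String.mk ((PySem.List.pyRange 0 n 1).foldl (fun (resultado : List Char) i =>
    if i ≥ PySem.Int.floordiv n 2 then
      resultado ++ [Char.ofNat ((PySem.List.pyGetD cs i ' ').toNat - 1)]
    else
      resultado ++ [PySem.List.pyGetD cs i ' ']) [])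

-- ===== PORT B =====
-- B: half = len//2; prefix slice unchanged ++ map of chr(ord(c)-1) over the suffix.
def codify3_alt (texto : String) : String :=
  let cs := texto.toList
  let half := cs.length / 2
  String.mk (cs.take half ++ (cs.drop half).map (fun c => Char.ofNat (c.toNat - 1)))

-- ===== PRECONDITION & SPEC =====
def Spec_codify3 (texto : String) (out : String) : Prop := out = codify3_alt texto
instance (texto : String) (out : String) : Decidable (Spec_codify3 texto out) := by unfold Spec_codify3; infer_instance

-- ===== CLAIM (what is proved, stated in full; the proofs are below) =====
def Claim_equal_codify3 : Prop := ∀ (texto : String), Dom_codify3 texto → Spec_codify3 texto (codify3 texto)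

-- ===== LEMMAS AND PROOFS =====

theorem codify3_core (cs : List Char) :
    (PySem.List.pyRange 0 (cs.length : Int) 1).foldl (fun (resultado : List Char) i =>
      if i ≥ PySem.Int.floordiv (cs.length : Int) 2 then
        resultado ++ [Char.ofNat ((PySem.List.pyGetD cs i ' ').toNat - 1)]
      else
        resultado ++ [PySem.List.pyGetD cs i ' ']) []
    = cs.take (cs.length / 2) ++ (cs.drop (cs.length / 2)).map (fun c => Char.ofNat (c.toNat - 1)) := by
  have hhalf : PySem.Int.floordiv (cs.length : Int) 2 = ((cs.length / 2 : Nat) : Int) := by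
    exact_mod_cast PySem.Int.floordiv_natCast cs.length 2
  set h : Nat := cs.length / 2 with hh
  have hle : (h : Int) ≤ (cs.length : Int) := by
    have := Nat.div_le_self cs.length 2
    omega
  -- push the if inside the appended singleton, then fold = map
  have step : ∀ (acc : List Char) (i : Int),
      (if i ≥ PySem.Int.floordiv (cs.length : Int) 2 then
        acc ++ [Char.ofNat ((PySem.List.pyGetD cs i ' ').toNat - 1)]
      else acc ++ [PySem.List.pyGetD cs i ' '])
      = acc ++ [if i ≥ (h : Int) then Char.ofNat ((PySem.List.pyGetD cs i ' ').toNat - 1)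
                else PySem.List.pyGetD cs i ' '] := by
    intro acc i
    rw [hhalf]
    by_cases hc : i ≥ (h : Int) <;> simp [hc]
  rw [PySem.List.foldl_congr_mem (PySem.List.pyRange 0 (cs.length : Int) 1) _
        (fun (acc : List Char) i => acc ++
          [if i ≥ (h : Int) then Char.ofNat ((PySem.List.pyGetD cs i ' ').toNat - 1)
           else PySem.List.pyGetD cs i ' ']) []
        (by intro acc x _; exact step acc x)]
  rw [PySem.List.foldl_append_singleton_eq_map]
  rw [PySem.List.pyRange_one_append 0 (h : Int) (cs.length : Int) (by omega) hle]
  rw [List.map_append, List.nil_append]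
  have hget : ∀ i : Int, ∀ h0 : 0 ≤ i, ∀ hlt : i < (cs.length : Int),
      PySem.List.pyGetD cs i ' ' = cs[i.toNat]'(by omega) := by
    intro i h0 hlt
    exact PySem.List.pyGetD_eq_getElem cs ' ' h0 (by simpa using hlt)
  congr 1
  · -- prefix: indices < h, branch not taken, identity map gives take
    have : (PySem.List.pyRange 0 (h : Int) 1).map (fun i =>
        if i ≥ (h : Int) then Char.ofNat ((PySem.List.pyGetD cs i ' ').toNat - 1)
        else PySem.List.pyGetD cs i ' ')
        = (PySem.List.pyRange 0 (h : Int) 1).map (fun i => PySem.List.pyGetD cs i ' ') := by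
      apply List.map_congr_left
      intro i hi
      rw [PySem.List.mem_pyRange_one] at hi
      have : ¬ i ≥ (h : Int) := by omega
      simp [this]
    rw [this]
    -- map pyGetD over pyRange 0 h = take h
    apply List.ext_getElem
    · simp [PySem.List.length_pyRange_one]; omega
    · intro k hk1 hk2
      have hkh : k < h := by
        simp only [List.length_map, PySem.List.length_pyRange_one] at hk1
        omega
      have hklen : k < cs.length := by omega
      rw [List.getElem_map, PySem.List.getElem_pyRange_one, List.getElem_take]
      have := hget ((0:Int) + k) (by omega) (by omega)
      have hidx : ((0:Int) + (k:Int)).toNat = k := by omega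
      simp only [hidx] at this
      exact this
  · -- suffix: branch taken, shifted chars give map over drop
    apply List.ext_getElem
    · simp [PySem.List.length_pyRange_one]
    · intro k hk1 hk2
      have hkr : k < (PySem.List.pyRange (h:Int) (cs.length:Int) 1).length := by
        simpa using hk1
      have hklen : h + k < cs.length := by
        simp [PySem.List.length_pyRange_one] at hkr; omega
      rw [List.getElem_map, PySem.List.getElem_pyRange_one]
      rw [List.getElem_map, List.getElem_drop]
      have hcond : ((h:Int) + (k:Int)) ≥ (h : Int) := by omega
      simp only [hcond, if_pos]
      have := hget ((h:Int) + (k:Int)) (by omega) (by omega)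
      have hidx : ((h:Int) + (k:Int)).toNat = h + k := by omega
      simp only [hidx] at this
      rw [this]

-- ===== VERDICT (by name: the statement is the Claim_ definition above) =====
theorem codify3_spec : Claim_equal_codify3 := by
  intro texto _
  show codify3 texto = codify3_alt texto
  unfold codify3 codify3_alt
  simp only [PySem.Str.len_eq]
  exact congrArg String.mk (codify3_core texto.toList)
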